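-- pv_equiv track=rewrite | github.com/vipulsingh24/DSA | Problems/robot_clean_rooms.py | get_max_clean_region
-- ===== SOURCE A (Python) =====
-- def is_valid_cell(matrix, current_row, current_col, max_row, max_col):
--     if current_row < 0 or current_col < 0 or current_row >= max_row or current_col >= max_col \
--             or matrix[current_row][current_col] == "X":
--         return False
--     return True
--
-- def get_clean_area(matrix, r, c, cleaned_area, R, C, direction="r"):
--     if not is_valid_cell(matrix, r, c, R, C):
--         return 0
--
--     if cleaned_area[r][c] == 1:
--         return 0
--
--     count = 1
--     cleaned_area[r][c] = 1
--
--     if direction == "r":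
--         c = c + 1
--     elif direction == "d":
--         r = r + 1
--     elif direction == "l":
--         c = c - 1
--     elif direction == "u":
--         r = r - 1
--
--     if is_valid_cell(matrix, r, c, R, C):
--         count += get_clean_area(matrix, r, c, cleaned_area, R, C, direction=direction)
--     else:
--         if direction == "r":
--             direction = "d"
--             r += 1
--             c -= 1
--         elif direction == "d":
--             direction = "l"
--             r -= 1
--             c -= 1
--         elif direction == "l":
--             direction = "u"
--             c += 1
--             r -= 1
--         elif direction == "u":
--             direction = "r"
--             r += 1
--             c += 1
--         count += get_clean_area(matrix, r, c, cleaned_area, R, C, direction=direction)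
--
--     return count
--
-- def get_max_clean_region(area):
--     max_clean_area = 0
--
--     R = len(area)
--     C = len(area[0])
--
--     cleaned_area = [[0 for _ in range(C)] for _ in range(R)]
--
--     for i in range(R):
--         for j in range(C):
--             if area[i][j] == "." and cleaned_area[i][j] == 0:
--                 clean_area = get_clean_area(area, i, j, cleaned_area, R, C)
--                 max_clean_area = max(max_clean_area, clean_area)
--
--     return max_clean_area
-- ===== SOURCE B (Python) =====
-- def get_max_clean_region(area):
--     R = len(area)
--     C = len(area[0])
--     DIRS = ((0, 1), (1, 0), (0, -1), (-1, 0))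
--     seen = [[False] * C for _ in range(R)]
--
--     def ok(r, c):
--         return 0 <= r < R and 0 <= c < C and area[r][c] != "X"
--
--     best = 0
--     for i in range(R):
--         for j in range(C):
--             if area[i][j] == "." and not seen[i][j]:
--                 r, c, d, n = i, j, 0, 0
--                 while ok(r, c) and not seen[r][c]:
--                     seen[r][c] = True
--                     n += 1
--                     nr, nc = r + DIRS[d][0], c + DIRS[d][1]
--                     if not ok(nr, nc):
--                         d = (d + 1) % 4
--                         nr, nc = r + DIRS[d][0], c + DIRS[d][1]
--                     r, c = nr, nc
--                 best = max(best, n)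
--     return best
-- ===== Notes on version B (the rewrite author's own statement) =====
-- stated objective: idiomatic
-- what changed: The recursive spiral-walk helper get_clean_area (string directions, per-direction turn offset arithmetic) is replaced by an explicit while loop over a numeric direction index with a (dr,dc) delta table, where the turned cell is simply the current cell plus the new direction's delta; the scan keeps a boolean seen-grid instead of a 0/1 int grid.
import Mathlib
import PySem

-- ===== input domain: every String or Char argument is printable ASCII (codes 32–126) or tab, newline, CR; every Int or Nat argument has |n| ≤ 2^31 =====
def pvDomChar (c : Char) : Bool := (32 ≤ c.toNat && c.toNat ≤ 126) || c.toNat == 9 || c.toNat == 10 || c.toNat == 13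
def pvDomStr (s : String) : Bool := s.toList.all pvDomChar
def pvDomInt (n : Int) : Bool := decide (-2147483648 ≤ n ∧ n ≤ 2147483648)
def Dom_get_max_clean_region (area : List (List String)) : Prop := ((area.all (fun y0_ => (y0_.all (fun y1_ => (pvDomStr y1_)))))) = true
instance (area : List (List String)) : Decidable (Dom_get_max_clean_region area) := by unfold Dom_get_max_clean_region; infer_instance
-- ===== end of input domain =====

-- B replaces A's spiral-walk recursion (get_clean_area) by an explicit while loop over a
-- numeric direction index with a delta table; objective: simpler/idiomatic, same cost.
-- A mutates a scratch grid it creates itself (no argument is mutated). On very large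
-- regions the Python A can hit the interpreter's recursion limit where B's loop returns;
-- the theorems below are about inputs where A returns.

-- ===== PORT A =====
-- matrix[r][c] read; in A it is only evaluated after the bounds checks pass, so the
-- defaults are never the result on admitted inputs (exact under Pre_).
def pvCellS (g : List (List String)) (r c : Int) : String :=
  (g.getD r.toNat []).getD c.toNat ""

def pvCellI (g : List (List Int)) (r c : Int) : Int :=
  (g.getD r.toNat []).getD c.toNat 0

-- cleaned_area[r][c] = v (nested list assignment, in-range when called)
def pvSetI (g : List (List Int)) (r c : Int) (v : Int) : List (List Int) :=
  g.set r.toNat ((g.getD r.toNat []).set c.toNat v)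

def is_valid_cell (matrix : List (List String)) (current_row current_col max_row max_col : Int) : Bool :=
  if current_row < 0 || current_col < 0 || current_row ≥ max_row || current_col ≥ max_col
      || pvCellS matrix current_row current_col == "X" then
    false
  else
    true

-- get_clean_area; the mutated cleaned_area is threaded and returned alongside the count.
-- fuel is a totality guard only: each recursive call happens after a fresh cell is marked,
-- so depth ≤ R*C + 1 and the fuel passed by get_max_clean_region is never exhausted.
def get_clean_areaA (matrix : List (List String)) (R C : Int) :
    Nat → Int → Int → List (List Int) → String → Int × List (List Int)
  | 0, _, _, cleaned, _ => (0, cleaned)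
  | fuel+1, r, c, cleaned, direction =>
    if !(is_valid_cell matrix r c R C) then (0, cleaned)
    else if pvCellI cleaned r c == 1 then (0, cleaned)
    else
      let cleaned := pvSetI cleaned r c 1
      let rc : Int × Int :=
        if direction == "r" then (r, c + 1)
        else if direction == "d" then (r + 1, c)
        else if direction == "l" then (r, c - 1)
        else if direction == "u" then (r - 1, c)
        else (r, c)
      let r := rc.1
      let c := rc.2
      if is_valid_cell matrix r c R C then
        let res := get_clean_areaA matrix R C fuel r c cleaned direction
        (1 + res.1, res.2)
      else
        let drc : String × Int × Int :=
          if direction == "r" then ("d", r + 1, c - 1)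
          else if direction == "d" then ("l", r - 1, c - 1)
          else if direction == "l" then ("u", r - 1, c + 1)
          else if direction == "u" then ("r", r + 1, c + 1)
          else (direction, r, c)
        let res := get_clean_areaA matrix R C fuel drc.2.1 drc.2.2 cleaned drc.1
        (1 + res.1, res.2)

def get_max_clean_region (area : List (List String)) : Int :=
  let R : Int := area.length
  let C : Int := (area.getD 0 []).length
  let cleaned : List (List Int) := List.replicate R.toNat (List.replicate C.toNat 0)
  let st := (PySem.List.pyRange 0 R 1).foldl (fun st i =>
    (PySem.List.pyRange 0 C 1).foldl (fun (st : Int × List (List Int)) j =>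
      if pvCellS area i j == "." && pvCellI st.2 i j == 0 then
        let res := get_clean_areaA area R C (R.toNat * C.toNat + 1) i j st.2 "r"
        (max st.1 res.1, res.2)
      else st) st) ((0 : Int), cleaned)
  st.1

-- ===== PORT B =====
def pvDIRS : List (Int × Int) := [(0, 1), (1, 0), (0, -1), (-1, 0)]

-- area[r][c] read in B (evaluated only after the bounds checks pass; exact under Pre_)
def pvCellS' (g : List (List String)) (r c : Int) : String :=
  (g.getD r.toNat []).getD c.toNat ""

def pvCellB (g : List (List Bool)) (r c : Int) : Bool :=
  (g.getD r.toNat []).getD c.toNat false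

def pvSetB (g : List (List Bool)) (r c : Int) (v : Bool) : List (List Bool) :=
  g.set r.toNat ((g.getD r.toNat []).set c.toNat v)

def pvOk (area : List (List String)) (R C r c : Int) : Bool :=
  decide (0 ≤ r) && decide (r < R) && decide (0 ≤ c) && decide (c < C)
    && (pvCellS' area r c != "X")

-- the while loop of B, with accumulator n; fuel is a totality guard only (each iteration
-- marks a fresh cell, so iterations ≤ R*C + 1 and the fuel passed below never runs out)
def pvWalk (area : List (List String)) (R C : Int) :
    Nat → Int → Int → Nat → List (List Bool) → Int → Int × List (List Bool)
  | 0, _, _, _, seen, n => (n, seen)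
  | fuel+1, r, c, d, seen, n =>
    if pvOk area R C r c && !(pvCellB seen r c) then
      let seen := pvSetB seen r c true
      let dd := pvDIRS.getD d (0, 0)
      let nr := r + dd.1
      let nc := c + dd.2
      if pvOk area R C nr nc then
        pvWalk area R C fuel nr nc d seen (n + 1)
      else
        let d := (d + 1) % 4
        let dd := pvDIRS.getD d (0, 0)
        pvWalk area R C fuel (r + dd.1) (c + dd.2) d seen (n + 1)
    else (n, seen)

def get_max_clean_region_alt (area : List (List String)) : Int :=
  let R : Int := area.length
  let C : Int := (area.getD 0 []).length
  let seen : List (List Bool) := List.replicate R.toNat (List.replicate C.toNat false)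
  let st := (PySem.List.pyRange 0 R 1).foldl (fun st i =>
    (PySem.List.pyRange 0 C 1).foldl (fun (st : Int × List (List Bool)) j =>
      if pvCellS' area i j == "." && !(pvCellB st.2 i j) then
        let res := pvWalk area R C (R.toNat * C.toNat + 1) i j 0 st.2 0
        (max st.1 res.1, res.2)
      else st) st) ((0 : Int), seen)
  st.1

-- ===== PRECONDITION & SPEC =====
-- Pre_ excludes exactly the inputs on which A raises IndexError: the empty grid
-- (area[0]) and grids with a row shorter than row 0 (the scan reads area[i][j] for
-- every j < len(area[0])).
def Pre_get_max_clean_region (area : List (List String)) : Prop :=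
  area ≠ [] ∧ ∀ row ∈ area, area.headI.length ≤ row.length
instance (area : List (List String)) : Decidable (Pre_get_max_clean_region area) := by
  unfold Pre_get_max_clean_region; infer_instance

def pvWitness_get_max_clean_region : List (List String) :=
  [[".", "X", "."], [".", ".", "."]]

def Spec_get_max_clean_region (area : List (List String)) (out : Int) : Prop := out = get_max_clean_region_alt area
instance (area : List (List String)) (out : Int) : Decidable (Spec_get_max_clean_region area out) := by unfold Spec_get_max_clean_region; infer_instance

-- ===== CLAIM (what is proved, stated in full; the proofs are below) =====
def Claim_equal_get_max_clean_region : Prop := ∀ (area : List (List String)), Dom_get_max_clean_region area → Pre_get_max_clean_region area → Spec_get_max_clean_region area (get_max_clean_region area)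

-- ===== LEMMAS AND PROOFS =====

-- encodes B's Bool scratch grid as A's 0/1 Int grid
def pvB2I (b : Bool) : Int := cond b 1 0

def pvEnc (g : List (List Bool)) : List (List Int) :=
  g.map (List.map pvB2I)

theorem pv_getD_map {α β : Type} (f : α → β) (l : List α) (n : Nat) (d : α) :
    (l.map f).getD n (f d) = f (l.getD n d) := by
  simp only [List.getD, List.getElem?_map]
  cases l[n]? <;> simp

theorem pv_cell_enc (s : List (List Bool)) (r c : Int) :
    pvCellI (pvEnc s) r c = pvB2I (pvCellB s r c) := by
  unfold pvCellI pvCellB pvEnc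
  rw [show ([] : List Int) = List.map pvB2I [] from rfl, pv_getD_map]
  rw [show (0 : Int) = pvB2I false from rfl, pv_getD_map]

theorem pv_set_enc (s : List (List Bool)) (r c : Int) :
    pvSetI (pvEnc s) r c 1 = pvEnc (pvSetB s r c true) := by
  unfold pvSetI pvSetB pvEnc
  rw [show ([] : List Int) = List.map pvB2I [] from rfl, pv_getD_map,
    show (1 : Int) = pvB2I true from rfl, ← List.map_set, ← List.map_set]

theorem pv_valid_ok (area : List (List String)) (R C r c : Int) :
    is_valid_cell area r c R C = pvOk area R C r c := by
  unfold is_valid_cell pvOk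
  rw [show pvCellS' = pvCellS from rfl]
  by_cases hx : pvCellS area r c == "X"
  · simp [hx]
    intros
    exact eq_of_beq hx
  · rw [Bool.eq_iff_iff]
    simp [hx, bne, not_lt]
    omega

-- correspondence between B's direction indices and A's direction strings
def pvDirStr (d : Nat) : String :=
  if d = 0 then "r" else if d = 1 then "d" else if d = 2 then "l" else "u"

theorem pv_walk_eq (area : List (List String)) (R C : Int) :
    ∀ (fuel : Nat) (r c : Int) (d : Nat) (s : List (List Bool)) (n : Int), d < 4 →
      (pvWalk area R C fuel r c d s n).1
          = n + (get_clean_areaA area R C fuel r c (pvEnc s) (pvDirStr d)).1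
      ∧ pvEnc (pvWalk area R C fuel r c d s n).2
          = (get_clean_areaA area R C fuel r c (pvEnc s) (pvDirStr d)).2 := by
  intro fuel
  induction fuel with
  | zero =>
    intro r c d s n hd
    simp [pvWalk, get_clean_areaA]
  | succ fuel ih =>
    intro r c d s n hd
    by_cases hv : pvOk area R C r c = true
    · by_cases hs : pvCellB s r c = true
      · simp [pvWalk, get_clean_areaA, pv_valid_ok, pv_cell_enc, hv, hs, pvB2I]
      · simp only [pvWalk, get_clean_areaA, pv_valid_ok, pv_cell_enc, pv_set_enc, hv, hs,
          Bool.not_false, Bool.and_true, Bool.not_true, if_true, pvB2I, cond_false,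
          Bool.false_eq_true, ite_false]
        interval_cases d
        · simp only [pvDirStr, pvDIRS, List.getD, List.getElem?_cons_zero,
            List.getElem?_cons_succ, Option.getD_some]
          simp
          try simp only [← sub_eq_add_neg]
          split_ifs with h2
          · obtain ⟨e1, e2⟩ := ih r (c + 1) 0 (pvSetB s r c true) (n + 1) (by norm_num)
            simp [pvDirStr] at e1 e2
            refine ⟨?_, ?_⟩ <;> simp [e1, e2] <;> omega
          · obtain ⟨e1, e2⟩ := ih (r + 1) c 1 (pvSetB s r c true) (n + 1) (by norm_num)
            simp [pvDirStr] at e1 e2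
            refine ⟨?_, ?_⟩ <;> simp [e1, e2] <;> omega
        · simp only [pvDirStr, pvDIRS, List.getD, List.getElem?_cons_zero,
            List.getElem?_cons_succ, Option.getD_some]
          simp
          try simp only [← sub_eq_add_neg]
          split_ifs with h2
          · obtain ⟨e1, e2⟩ := ih (r + 1) c 1 (pvSetB s r c true) (n + 1) (by norm_num)
            simp [pvDirStr] at e1 e2
            refine ⟨?_, ?_⟩ <;> simp [e1, e2] <;> omega
          · obtain ⟨e1, e2⟩ := ih r (c - 1) 2 (pvSetB s r c true) (n + 1) (by norm_num)
            simp [pvDirStr] at e1 e2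
            refine ⟨?_, ?_⟩ <;> simp [e1, e2] <;> omega
        · simp only [pvDirStr, pvDIRS, List.getD, List.getElem?_cons_zero,
            List.getElem?_cons_succ, Option.getD_some]
          simp
          try simp only [← sub_eq_add_neg]
          split_ifs with h2
          · obtain ⟨e1, e2⟩ := ih r (c - 1) 2 (pvSetB s r c true) (n + 1) (by norm_num)
            simp [pvDirStr] at e1 e2
            refine ⟨?_, ?_⟩ <;> simp [e1, e2] <;> omega
          · obtain ⟨e1, e2⟩ := ih (r - 1) c 3 (pvSetB s r c true) (n + 1) (by norm_num)
            simp [pvDirStr] at e1 e2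
            refine ⟨?_, ?_⟩ <;> simp [e1, e2] <;> omega
        · simp only [pvDirStr, pvDIRS, List.getD, List.getElem?_cons_zero,
            List.getElem?_cons_succ, Option.getD_some]
          simp
          try simp only [← sub_eq_add_neg]
          split_ifs with h2
          · obtain ⟨e1, e2⟩ := ih (r - 1) c 3 (pvSetB s r c true) (n + 1) (by norm_num)
            simp [pvDirStr] at e1 e2
            refine ⟨?_, ?_⟩ <;> simp [e1, e2] <;> omega
          · obtain ⟨e1, e2⟩ := ih r (c + 1) 0 (pvSetB s r c true) (n + 1) (by norm_num)
            simp [pvDirStr] at e1 e2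
            refine ⟨?_, ?_⟩ <;> simp [e1, e2] <;> omega
    · simp [pvWalk, get_clean_areaA, pv_valid_ok, hv]

theorem pv_foldl_rel {α β γ : Type} (P : α → β → Prop) (f : α → γ → α) (g : β → γ → β)
    (l : List γ) (a : α) (b : β) (hab : P a b)
    (hstep : ∀ a b x, P a b → P (f a x) (g b x)) :
    P (l.foldl f a) (l.foldl g b) := by
  induction l generalizing a b with
  | nil => exact hab
  | cons x t ih => exact ih (f a x) (g b x) (hstep a b x hab)

theorem get_max_eq (area : List (List String)) :
    get_max_clean_region area = get_max_clean_region_alt area := by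
  unfold get_max_clean_region get_max_clean_region_alt
  dsimp only
  refine (pv_foldl_rel (fun (a : Int × List (List Int)) (b : Int × List (List Bool)) =>
      a.1 = b.1 ∧ a.2 = pvEnc b.2) _ _ _ _ _ ⟨rfl, by simp [pvEnc, pvB2I]⟩ ?_).1
  intro a b i hab
  refine pv_foldl_rel (fun (a : Int × List (List Int)) (b : Int × List (List Bool)) =>
    a.1 = b.1 ∧ a.2 = pvEnc b.2) _ _ _ _ _ hab ?_
  intro a b j hab
  rw [show pvCellS' = pvCellS from rfl]
  obtain ⟨h1, h2⟩ := hab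
  rw [h2, pv_cell_enc]
  by_cases hc : pvCellB b.2 i j = true
  · simp only [hc, pvB2I, cond_true]
    norm_num
    exact ⟨h1, h2⟩
  · rw [Bool.not_eq_true] at hc
    simp only [hc, pvB2I, cond_false, Bool.not_false, Bool.and_true, beq_self_eq_true]
    by_cases hdot : (pvCellS area i j == ".") = true
    · simp only [hdot, Bool.true_and, if_true]
      obtain ⟨e1, e2⟩ := pv_walk_eq area (area.length : Int) ((area.getD 0 []).length : Int)
        ((area.length : Int).toNat * ((area.getD 0 []).length : Int).toNat + 1) i j 0 b.2 0
        (by norm_num)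
      have hdir : pvDirStr 0 = "r" := rfl
      rw [hdir] at e1 e2
      rw [zero_add] at e1
      exact ⟨by rw [h1, e1], by rw [← e2]⟩
    · simp only [hdot]
      norm_num
      exact ⟨h1, h2⟩

-- ===== VERDICT (by name: the statement is the Claim_ definition above) =====
theorem get_max_clean_region_spec : Claim_equal_get_max_clean_region := by
  intro area _ _
  unfold Spec_get_max_clean_region
  exact get_max_eq area
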